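-- pv_equiv track=rewrite | github.com/cobaltt7/python-exercises | 6 string/68-69.py | sixty_eight
-- ===== SOURCE A (Python) =====
-- def sixty_eight(string: str):
--     """
--     Write a Python program to create two strings from a given string. Create the first string using
--     those character which occurs only once and create the second string which consists of multi-time
--     occurring characters in the said string.
--     """
--     string = string.lower()
--     unique = [
--         character
--         for character in string
--         if string.index(character) == string.rindex(character)
--     ]
--     duplicates = [
--         character
--         for character in string
--         if string.index(character) != string.rindex(character)
--     ]
--     duplicated = sorted(set(duplicates))
--     return ("".join(sorted(unique)), "".join(duplicated))
-- ===== SOURCE B (Python) =====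
-- def sixty_eight(string: str):
--     counts = {}
--     for character in string.lower():
--         counts[character] = counts.get(character, 0) + 1
--     unique = sorted(c for c in counts if counts[c] == 1)
--     duplicated = sorted(c for c in counts if counts[c] > 1)
--     return ("".join(unique), "".join(duplicated))
-- ===== Notes on version B (the rewrite author's own statement) =====
-- stated objective: faster
-- what changed: Replaced A's per-character whole-string index/rindex scans and post-hoc set() dedup by one counting-dict pass over the lowered string followed by sorts over the distinct characters only.
import Mathlib
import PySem

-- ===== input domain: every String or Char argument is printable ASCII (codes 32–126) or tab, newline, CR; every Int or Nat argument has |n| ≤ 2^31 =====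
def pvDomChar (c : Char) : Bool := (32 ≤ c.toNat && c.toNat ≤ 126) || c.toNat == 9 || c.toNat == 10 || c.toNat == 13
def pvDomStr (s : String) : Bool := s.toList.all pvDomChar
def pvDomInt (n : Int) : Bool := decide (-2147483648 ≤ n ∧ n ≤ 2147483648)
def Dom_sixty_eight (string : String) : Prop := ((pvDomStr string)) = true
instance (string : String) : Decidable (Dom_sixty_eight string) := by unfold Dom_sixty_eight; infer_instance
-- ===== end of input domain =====

-- B replaces A's per-character whole-string index/rindex scans by one counting-dict
-- pass over the lowered string plus sorts over the distinct characters only (faster).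

-- ===== PORT A =====
-- hand port of str.rindex(character): first index of the character in the reversed
-- list, mapped back; exact whenever the character occurs (the only case A reaches,
-- since the comprehension draws `character` from the string itself).
def pyRindexChars (l : List Char) (c : Char) : Option Nat :=
  (PySem.List.index? l.reverse c).map (fun i => l.length - 1 - i)

def sixty_eight (string : String) : List String :=
  let l := PySem.Chars.lower string.toList
  let unique := l.filter (fun c => PySem.List.index? l c == pyRindexChars l c)
  let duplicates := l.filter (fun c => !(PySem.List.index? l c == pyRindexChars l c))
  let duplicated := PySem.List.sorted (PySem.Set.ofList duplicates) (fun x => x) false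
  [String.ofList (PySem.List.sorted unique (fun x => x) false), String.ofList duplicated]

-- ===== PORT B =====
def sixty_eight_alt (string : String) : List String :=
  let counts := (PySem.Chars.lower string.toList).foldl
    (fun d ch => d.insert ch (d.getD ch 0 + 1)) (PySem.Dict.empty : PySem.Dict Char Int)
  let unique := PySem.List.sorted
    (counts.keys.filter (fun c => counts.getD c 0 == 1)) (fun x => x) false
  let duplicated := PySem.List.sorted
    (counts.keys.filter (fun c => decide (1 < counts.getD c 0))) (fun x => x) false
  [String.ofList unique, String.ofList duplicated]

-- ===== PRECONDITION & SPEC =====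
def Spec_sixty_eight (string : String) (out : List String) : Prop := out = sixty_eight_alt string
instance (string : String) (out : List String) : Decidable (Spec_sixty_eight string out) := by unfold Spec_sixty_eight; infer_instance

-- ===== CLAIM (what is proved, stated in full; the proofs are below) =====
def Claim_equal_sixty_eight : Prop := ∀ (string : String), Dom_sixty_eight string → Spec_sixty_eight string (sixty_eight string)

-- ===== LEMMAS AND PROOFS =====

-- A's test `string.index(c) == string.rindex(c)` says: c occurs exactly once.
theorem index_eq_rindex_iff_count_one (l : List Char) (c : Char) (hc : c ∈ l) :
    (PySem.List.index? l c = pyRindexChars l c) ↔ l.count c = 1 := by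
  obtain ⟨k, hk⟩ := Option.isSome_iff_exists.mp ((PySem.List.index?_isSome_iff l c).mpr hc)
  obtain ⟨pre, suf, hdec, hlen, hpre⟩ := (PySem.List.index?_eq_some_iff l c k).mp hk
  subst hdec
  have hcnt : (pre ++ c :: suf).count c = suf.count c + 1 := by
    rw [List.count_append, List.count_cons_self, List.count_eq_zero.mpr hpre]
    omega
  have hrev : (pre ++ c :: suf).reverse = suf.reverse ++ c :: pre.reverse := by
    simp
  have hL : (pre ++ c :: suf).length = pre.length + suf.length + 1 := by
    simp; omega
  by_cases hsuf : c ∈ suf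
  · -- at least two occurrences: the two indices differ, and count ≥ 2
    have hcge : 1 ≤ suf.count c := List.count_pos_iff.mpr hsuf
    obtain ⟨j, hjk⟩ := Option.isSome_iff_exists.mp
      ((PySem.List.index?_isSome_iff _ c).mpr (by simp [hrev] : c ∈ (pre ++ c :: suf).reverse))
    obtain ⟨hj, hget, hmin⟩ := PySem.List.getElem_of_index?_eq_some hjk
    obtain ⟨i0, hi0, hgi0⟩ := List.mem_iff_getElem.mp (List.mem_reverse.mpr hsuf)
    have hi0' : i0 < (pre ++ c :: suf).reverse.length := by
      simp only [List.length_reverse, hL]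
      simp only [List.length_reverse] at hi0
      omega
    have hgl : (pre ++ c :: suf).reverse[i0]'hi0' = c := by
      rw [List.getElem_of_eq hrev hi0']
      rw [List.getElem_append_left (by simpa using hi0)]
      simpa using hgi0
    have hji : j ≤ i0 := by
      by_contra hgt
      exact hmin i0 (by omega) hgl
    have hjlt : j < suf.length := by simpa using Nat.lt_of_le_of_lt hji hi0
    constructor
    · intro heq
      exfalso
      rw [hk] at heq
      unfold pyRindexChars at heq
      rw [hjk] at heq
      simp only [Option.map_some, Option.some.injEq] at heq
      rw [hL] at heq
      omega
    · intro h1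
      rw [hcnt] at h1
      omega
  · -- exactly one occurrence: both indices are pre.length
    have h1 : (pre ++ c :: suf).count c = 1 := by
      rw [hcnt, List.count_eq_zero.mpr hsuf]
    refine iff_of_true ?_ h1
    have hrix : PySem.List.index? (pre ++ c :: suf).reverse c = some suf.reverse.length :=
      (PySem.List.index?_eq_some_iff _ c _).mpr
        ⟨suf.reverse, pre.reverse, hrev, rfl, by simpa using hsuf⟩
    rw [hk]
    unfold pyRindexChars
    rw [hrix]
    simp only [Option.map_some, Option.some.injEq]
    rw [hL]
    simp only [List.length_reverse]
    omega

theorem sorted_filter_eq_sorted_ofList_filter (l : List Char) (p : Char → Bool)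
    (hnd : (l.filter p).Nodup) :
    PySem.List.sorted (l.filter p) (fun x => x) false
      = PySem.List.sorted ((PySem.Set.ofList l).filter p) (fun x => x) false := by
  apply PySem.List.sorted_eq_sorted_of_perm _ _ _ (fun a b => id)
  refine (List.perm_ext_iff_of_nodup hnd (List.Nodup.filter p (PySem.Set.nodup_ofList l))).mpr ?_
  intro a
  simp [List.mem_filter, PySem.Set.mem_ofList]

-- ===== VERDICT (by name: the statement is the Claim_ definition above) =====
theorem sixty_eight_spec : Claim_equal_sixty_eight := by
  intro string _
  unfold Spec_sixty_eight sixty_eight sixty_eight_alt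
  rw [PySem.Dict.foldl_insert_getD_add_one_eq_counter]
  set l := PySem.Chars.lower string.toList with hl
  dsimp only
  rw [PySem.Dict.keys_counter]
  have hcond : ∀ c ∈ l,
      (PySem.List.index? l c == pyRindexChars l c) = (List.count c l == 1) := by
    intro c hc
    rw [Bool.eq_iff_iff]
    simp only [beq_iff_eq]
    exact index_eq_rindex_iff_count_one l c hc
  have hfu : l.filter (fun c => PySem.List.index? l c == pyRindexChars l c)
      = l.filter (fun c => List.count c l == 1) :=
    List.filter_congr hcond
  have hfd : l.filter (fun c => !(PySem.List.index? l c == pyRindexChars l c))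
      = l.filter (fun c => !(List.count c l == 1)) :=
    List.filter_congr (fun c hc => by rw [hcond c hc])
  have hnd : (l.filter (fun c => List.count c l == 1)).Nodup := by
    rw [List.nodup_iff_count]
    intro a
    by_cases hp : (List.count a l == 1) = true
    · rw [List.count_filter (p := fun c => List.count c l == 1) hp]
      have : List.count a l = 1 := by simpa using hp
      omega
    · have : List.count a (l.filter (fun c => List.count c l == 1)) = 0 := by
        refine List.count_eq_zero.mpr ?_
        simp only [List.mem_filter]
        rintro ⟨-, hmem⟩
        exact hp hmem
      omega
  rw [hfu, hfd]
  congr 1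
  · -- unique component
    congr 1
    have hkey : (PySem.Set.ofList l).filter (fun c => (PySem.Dict.counter l).getD c 0 == 1)
        = (PySem.Set.ofList l).filter (fun c => List.count c l == 1) := by
      refine List.filter_congr (fun c _ => ?_)
      rw [PySem.Dict.getD_counter, Bool.eq_iff_iff]
      simp only [beq_iff_eq]
      omega
    rw [hkey]
    exact sorted_filter_eq_sorted_ofList_filter l _ hnd
  · -- duplicated component
    congr 2
    apply PySem.List.sorted_eq_sorted_of_perm _ _ _ (fun a b => id)
    refine (List.perm_ext_iff_of_nodup (PySem.Set.nodup_ofList _)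
      (List.Nodup.filter _ (PySem.Set.nodup_ofList l))).mpr ?_
    intro a
    rw [PySem.Set.mem_ofList]
    simp only [List.mem_filter, PySem.Set.mem_ofList, PySem.Dict.getD_counter,
      Bool.not_eq_eq_eq_not, Bool.not_true, beq_eq_false_iff_ne, ne_eq, decide_eq_true_eq]
    constructor
    · rintro ⟨ha, hcnt⟩
      have : 1 ≤ List.count a l := List.count_pos_iff.mpr ha
      exact ⟨ha, by omega⟩
    · rintro ⟨ha, hcnt⟩
      exact ⟨ha, by omega⟩
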